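-- pv_equiv track=rewrite | github.com/Carlososuna11/codewars-handbook | python/kata/3-kyu/Alphametics Solver/solution.py | alphametics
-- ===== SOURCE A (Python) =====
-- def alphametics(puzzle):
--     words = puzzle.strip().replace(' ','').replace('=',',').replace('+',',').split(',')
--     letters_dict = {}
--     unique = ''
--     valid =list(map(lambda x: x[0],words))
--     usedNumbers = [False,False,False,False,False,False,False,False,False,False]
--     for word in words:
--         for letter in word:
--             if letter not in letters_dict:
--                 letters_dict[letter] = -1
--                 unique+=letter
--     stack = [(letters_dict,usedNumbers,0)]
--     while len(stack) > 0:
--         letters_dict,usedNumbers,idx = stack.pop()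
--         if (idx==len(unique)):
--             intlist = []
--             for word in words:
--                 num = ''
--                 for letter in word:
--                     num+=str(letters_dict.get(letter,''))
--                 intlist.append(int(num))
--             if(sum(intlist[:-1])==intlist[-1]):
--                 for key in letters_dict:
--                     puzzle = puzzle.replace(key,f"{letters_dict[key]}")
--                 return puzzle
--         else:
--             ch = unique[idx]
--             for i in [0,1,2,3,4,5,9,8,7,6]:
--                 if i == 0:
--                     if ch in valid:
--                         continue
--                 if usedNumbers[i] == False:
--                     usedNumbers[i]=True
--                     letters_dict[ch]=i
--                     stack.append((letters_dict.copy(),usedNumbers[:],idx+1))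
--                     usedNumbers[i]=False
--                     letters_dict[ch]=-1
-- ===== SOURCE B (Python) =====
-- def alphametics(puzzle):
--     words = puzzle.strip().replace(' ', '').replace('=', ',').replace('+', ',').split(',')
--     unique = []
--     for w in words:
--         for ch in w:
--             if ch not in unique:
--                 unique.append(ch)
--     first = [w[0] for w in words]
--
--     def value(w, env):
--         v = 0
--         for ch in w:
--             v = 10 * v + env[ch]
--         return v
--
--     def solve(pending, used, env):
--         if not pending:
--             vals = [value(w, env) for w in words]
--             return env if sum(vals[:-1]) == vals[-1] else None
--         ch = pending[0]
--         for d in (6, 7, 8, 9, 5, 4, 3, 2, 1, 0):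
--             if d in used or (d == 0 and ch in first):
--                 continue
--             r = solve(pending[1:], used | {d}, {**env, ch: d})
--             if r is not None:
--                 return r
--         return None
--
--     env = solve(unique, frozenset(), {})
--     if env is None:
--         return None
--     for ch in unique:
--         puzzle = puzzle.replace(ch, str(env[ch]))
--     return puzzle
-- ===== Notes on version B (the rewrite author's own statement) =====
-- stated objective: alternative
-- what changed: A's explicit stack of copied dict/used-array states with string-building plus int() re-parsing at every leaf is replaced by a recursive backtracking search over the remaining letters (immutable set/env, no stack, no dict copies) that evaluates each candidate assignment arithmetically with a Horner fold; both visit digits in A's exact order, so the same first solution is returned.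
import Mathlib
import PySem

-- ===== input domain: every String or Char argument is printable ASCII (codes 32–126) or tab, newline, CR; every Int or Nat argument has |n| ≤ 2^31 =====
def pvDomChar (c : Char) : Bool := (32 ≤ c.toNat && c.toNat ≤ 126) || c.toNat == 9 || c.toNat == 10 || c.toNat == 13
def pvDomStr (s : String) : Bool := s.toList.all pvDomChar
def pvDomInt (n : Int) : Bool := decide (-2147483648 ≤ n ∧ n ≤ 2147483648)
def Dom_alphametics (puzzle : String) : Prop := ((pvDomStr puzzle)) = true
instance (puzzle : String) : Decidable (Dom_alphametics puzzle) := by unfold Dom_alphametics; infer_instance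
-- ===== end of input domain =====

-- B re-implements A's depth-first digit search recursively (no explicit stack, no dict
-- copies) and evaluates candidate assignments arithmetically instead of building and
-- re-parsing digit strings; both return A's exact first solution.

-- ===== PORT A =====
-- A's explicit stack is modelled head-as-top (Python appends and pops at the right end).
def pvDigitsA : List Int := [0, 1, 2, 3, 4, 5, 9, 8, 7, 6]

-- int(num): in A, num is always a string of decimal digit characters (each appended as
-- str(d) for an assigned digit 0 ≤ d ≤ 9), so int() is exact decimal parsing there;
-- ported by hand as the decimal-digit parse (exact on that domain; int('') raises in
-- Python, which only happens for an empty word — excluded by Pre_alphametics).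
def pvParseInt (cs : List Char) : Int :=
  cs.foldl (fun a c => 10 * a + ((c.toNat : Int) - 48)) 0

-- num += str(letters_dict.get(letter, '')) : str('') = '' when the letter were absent
def pvNumstrA (d : PySem.Dict Char Int) (w : List Char) : List Char :=
  w.foldl (fun num c =>
    num ++ (match d.get? c with
            | some v => PySem.Int.toChars v
            | none => [])) []

def pvIntlistA (d : PySem.Dict Char Int) (words : List (List Char)) : List Int :=
  words.foldl (fun acc w => acc ++ [pvParseInt (pvNumstrA d w)]) []

-- the while-loop over the stack; fuel only makes the recursion total (the proof shows
-- 11 ^ (len(unique) + 1) steps always suffice)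
def pvLoopA (pz : List Char) (words : List (List Char)) (unique valid : List Char) :
    Nat → List (PySem.Dict Char Int × List Bool × Nat) → Option (List Char)
  | 0, _ => none
  | _ + 1, [] => none
  | fuel + 1, (d, used, idx) :: rest =>
    if idx = unique.length then
      let intlist := pvIntlistA d words
      if (PySem.List.slice intlist none (some (-1))).sum
          = PySem.List.pyGetD intlist (-1) 0 then
        -- for key in letters_dict: puzzle = puzzle.replace(key, f"{letters_dict[key]}")
        some (d.items.foldl
          (fun p kv => PySem.Chars.replace p [kv.1] (PySem.Int.toChars kv.2)) pz)
      else
        pvLoopA pz words unique valid fuel rest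
    else
      let ch := PySem.List.pyGetD unique (idx : Int) ' '   -- unique[idx], idx < len here
      pvLoopA pz words unique valid fuel
        (pvDigitsA.foldl (fun stk i =>
          if i = 0 ∧ ch ∈ valid then stk
          else if PySem.List.pyGetD used i false = false then
            (d.insert ch i, PySem.List.pySetD used i true, idx + 1) :: stk
          else stk) rest)

def alphametics (puzzle : String) : Option String :=
  let words := PySem.Chars.splitOn
      (PySem.Chars.replace (PySem.Chars.replace (PySem.Chars.replace
        (PySem.Chars.strip puzzle.toList) [' '] []) ['='] [',']) ['+'] [',']) [',']
  let valid := words.map (fun w => PySem.List.pyGetD w 0 ',')   -- w[0]; IndexError on an empty word is outside Pre_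
  let du := words.foldl (fun (st : PySem.Dict Char Int × List Char) w =>
      w.foldl (fun st c =>
        if st.1.contains c then st else (st.1.insert c (-1), st.2 ++ [c])) st)
      (PySem.Dict.empty, [])
  let usedNumbers := List.replicate 10 false
  (pvLoopA puzzle.toList words du.2 valid (11 ^ (du.2.length + 1))
      [(du.1, usedNumbers, 0)]).map String.ofList

-- ===== PORT B =====
def pvDigitsB : List Int := [6, 7, 8, 9, 5, 4, 3, 2, 1, 0]

-- value(w, env): v = 10*v + env[ch]  (env[ch] never raises: every letter is assigned)
def pvValueB (env : PySem.Dict Char Int) (w : List Char) : Int :=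
  w.foldl (fun v c => 10 * v + env.getD c 0) 0

def pvSolveB (words : List (List Char)) (first : List Char) :
    List Char → PySem.Set Int → PySem.Dict Char Int → Option (PySem.Dict Char Int)
  | [], _, env =>
    let vals := words.map (fun w => pvValueB env w)
    if (PySem.List.slice vals none (some (-1))).sum
        = PySem.List.pyGetD vals (-1) 0 then some env else none
  | ch :: pending, used, env =>
    pvDigitsB.foldl (fun acc d =>
      match acc with
      | some r => some r
      | none =>
        if PySem.Set.contains used d = true ∨ (d = 0 ∧ ch ∈ first) then none
        else pvSolveB words first pending (PySem.Set.union used [d]) (env.insert ch d))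
      none

def alphametics_alt (puzzle : String) : Option String :=
  let words := PySem.Chars.splitOn
      (PySem.Chars.replace (PySem.Chars.replace (PySem.Chars.replace
        (PySem.Chars.strip puzzle.toList) [' '] []) ['='] [',']) ['+'] [',']) [',']
  let unique := words.foldl (fun u w =>
      w.foldl (fun u c => if c ∈ u then u else u ++ [c]) u) []
  let first := words.map (fun w => PySem.List.pyGetD w 0 ',')   -- w[0]; IndexError on an empty word is outside Pre_
  match pvSolveB words first unique PySem.Set.empty PySem.Dict.empty with
  | none => none
  | some env =>
    some (String.ofList (unique.foldl (fun p ch =>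
      PySem.Chars.replace p [ch] (PySem.Int.toChars (env.getD ch 0))) puzzle.toList))

-- ===== PRECONDITION & SPEC =====
-- Pre_ excludes exactly the puzzles that tokenise to an empty word ('', '+ =A', 'A++B=C', …):
-- there Python A raises IndexError on words[i][0] (and B raises the same way).
def Pre_alphametics (puzzle : String) : Prop :=
  [] ∉ PySem.Chars.splitOn
      (PySem.Chars.replace (PySem.Chars.replace (PySem.Chars.replace
        (PySem.Chars.strip puzzle.toList) [' '] []) ['='] [',']) ['+'] [',']) [',']
instance (puzzle : String) : Decidable (Pre_alphametics puzzle) := by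
  unfold Pre_alphametics; infer_instance

def pvWitness_alphametics : String := "SEND + MORE = MONEY"

def Spec_alphametics (puzzle : String) (out : Option String) : Prop := out = alphametics_alt puzzle
instance (puzzle : String) (out : Option String) : Decidable (Spec_alphametics puzzle out) := by
  unfold Spec_alphametics; infer_instance

-- ===== CLAIM (what is proved, stated in full; the proofs are below) =====
def Claim_equal_alphametics : Prop := ∀ (puzzle : String), Dom_alphametics puzzle → Pre_alphametics puzzle → Spec_alphametics puzzle (alphametics puzzle)

-- ===== LEMMAS AND PROOFS =====

-- proof-side abstractions: the reachable states of A's stack machine, parametrised by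
-- the list σ of digits assigned so far to the first σ.length letters of `unique`

def pvMkD (u : List Char) (σ : List Int) : PySem.Dict Char Int :=
  PySem.Dict.mk ((u.take σ.length).zip σ ++ (u.drop σ.length).map (fun c => (c, -1)))

def pvMkEnv (u : List Char) (σ : List Int) : PySem.Dict Char Int :=
  PySem.Dict.mk ((u.take σ.length).zip σ)

def pvMkUsed (σ : List Int) : List Bool :=
  (PySem.List.pyRange 0 10 1).map (fun i => decide (i ∈ σ))

def pvAState (u : List Char) (σ : List Int) : PySem.Dict Char Int × List Bool × Nat :=
  (pvMkD u σ, pvMkUsed σ, σ.length)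

def pvFinish (pz : List Char) (env : PySem.Dict Char Int) : List Char :=
  env.items.foldl (fun p kv => PySem.Chars.replace p [kv.1] (PySem.Int.toChars kv.2)) pz

def pvBRes (words : List (List Char)) (valid u : List Char) (σ : List Int) :
    Option (PySem.Dict Char Int) :=
  pvSolveB words valid (u.drop σ.length) σ (pvMkEnv u σ)

-- generic loop-shape lemmas specific to the two ports

theorem pvFoldlStackpush {α β : Type} (l : List α) (P Q : α → Prop)
    [DecidablePred P] [DecidablePred Q] (g : α → β) (rest : List β) :
    l.foldl (fun stk i => if P i then stk else if Q i then g i :: stk else stk) rest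
      = ((l.reverse.filter (fun i => decide (¬ P i ∧ Q i))).map g) ++ rest := by
  induction l generalizing rest with
  | nil => simp
  | cons i t ih =>
    simp only [List.foldl_cons, List.reverse_cons, List.filter_append, List.map_append,
      List.append_assoc, ih]
    by_cases hP : P i <;> by_cases hQ : Q i <;> simp [hP, hQ]

theorem pvFoldlOrelseSome {α β : Type} (l : List α) (g : Option β → α → Option β)
    (hg1 : ∀ r d, g (some r) d = some r) (r : β) :
    l.foldl g (some r) = some r := by
  induction l with
  | nil => rfl
  | cons a t ih => simp only [List.foldl_cons, hg1]; exact ih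

theorem pvFoldlOrelse {α β : Type} (l : List α) (g : Option β → α → Option β)
    (f : α → Option β) (hg1 : ∀ r d, g (some r) d = some r)
    (hg2 : ∀ d, g none d = f d) :
    l.foldl g none = l.findSome? f := by
  induction l with
  | nil => rfl
  | cons a t ih =>
    simp only [List.foldl_cons, List.findSome?_cons, hg2]
    cases h : f a with
    | none => exact ih
    | some r => exact pvFoldlOrelseSome t g hg1 r

theorem pvFindSomeIfNone {α β : Type} (l : List α) (P : α → Prop) [DecidablePred P]
    (g : α → Option β) :
    l.findSome? (fun d => if P d then none else g d)
      = (l.filter (fun d => decide (¬ P d))).findSome? g := by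
  induction l with
  | nil => rfl
  | cons a t ih =>
    by_cases h : P a <;> simp [List.findSome?_cons, h, ih]

-- digits and parsing

theorem pvDigitsB_bounds : ∀ d ∈ pvDigitsB, 0 ≤ d ∧ d ≤ 9 := by decide

theorem pvDigitsA_reverse : pvDigitsA.reverse = pvDigitsB := by decide

theorem pvDigitFold (v a : Int) (h0 : 0 ≤ v) (h9 : v ≤ 9) :
    (PySem.Int.toChars v).foldl (fun x c => 10 * x + ((c.toNat : Int) - 48)) a
      = 10 * a + v := by
  interval_cases v <;>
    simp only [show PySem.Int.toChars 0 = ['0'] from by decide,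
      show PySem.Int.toChars 1 = ['1'] from by decide,
      show PySem.Int.toChars 2 = ['2'] from by decide,
      show PySem.Int.toChars 3 = ['3'] from by decide,
      show PySem.Int.toChars 4 = ['4'] from by decide,
      show PySem.Int.toChars 5 = ['5'] from by decide,
      show PySem.Int.toChars 6 = ['6'] from by decide,
      show PySem.Int.toChars 7 = ['7'] from by decide,
      show PySem.Int.toChars 8 = ['8'] from by decide,
      show PySem.Int.toChars 9 = ['9'] from by decide,
      show ('0'.toNat : Nat) = 48 from rfl,
      show ('1'.toNat : Nat) = 49 from rfl,
      show ('2'.toNat : Nat) = 50 from rfl,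
      show ('3'.toNat : Nat) = 51 from rfl,
      show ('4'.toNat : Nat) = 52 from rfl,
      show ('5'.toNat : Nat) = 53 from rfl,
      show ('6'.toNat : Nat) = 54 from rfl,
      show ('7'.toNat : Nat) = 55 from rfl,
      show ('8'.toNat : Nat) = 56 from rfl,
      show ('9'.toNat : Nat) = 57 from rfl,
      List.foldl_cons, List.foldl_nil] <;> norm_num

-- state correspondence

theorem pvMkD_keys (u : List Char) (σ : List Int) (h : σ.length ≤ u.length) :
    (pvMkD u σ).keys = u := by
  have hlen : (u.take σ.length).length ≤ σ.length := by
    simp [List.length_take]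
  simp only [pvMkD, PySem.Dict.keys_mk, List.map_append, List.map_fst_zip hlen,
    List.map_map]
  have : ((fun x => x.1) ∘ fun c => ((c, -1) : Char × Int)) = id := rfl
  simp [this]

theorem pvMkD_full (u : List Char) (τ : List Int) (h : τ.length = u.length) :
    pvMkD u τ = pvMkEnv u τ := by
  simp [pvMkD, pvMkEnv, h, List.take_of_length_le (le_of_eq h.symm),
    List.drop_eq_nil_of_le (le_of_eq h.symm)]

theorem pvChildD (u : List Char) (σ : List Int) (d : Int) (hnd : u.Nodup)
    (hk : σ.length < u.length) :
    (pvMkD u σ).insert u[σ.length] d = pvMkD u (σ ++ [d]) := by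
  have hσu : σ.length ≤ u.length := le_of_lt hk
  have htk : (u.take σ.length).length = σ.length := by simp [List.length_take, hσu]
  have hdrop := List.drop_eq_getElem_cons hk
  have hmid : (u.take σ.length ++ u[σ.length] :: u.drop (σ.length + 1)).Nodup := by
    rw [← hdrop, List.take_append_drop]; exact hnd
  have hnotin := (List.nodup_cons.mp (List.nodup_middle.mp hmid)).1
  have hn1 : u[σ.length] ∉ u.take σ.length := fun h => hnotin (List.mem_append_left _ h)
  have hn2 : u[σ.length] ∉ u.drop (σ.length + 1) := fun h => hnotin (List.mem_append_right _ h)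
  have hcont : (pvMkD u σ).contains u[σ.length] = true := by
    rw [PySem.Dict.contains_iff_mem_keys, pvMkD_keys u σ hσu]
    exact List.getElem_mem hk
  have etake : u.take (σ.length + 1) = u.take σ.length ++ [u[σ.length]] := by
    rw [List.take_succ]
    simp [List.getElem?_eq_getElem hk]
  have e1 : ((u.take σ.length).zip σ).map
      (fun p => if (p.1 == u[σ.length]) = true then (u[σ.length], d) else p)
      = (u.take σ.length).zip σ := by
    conv_rhs => rw [← List.map_id ((u.take σ.length).zip σ)]
    apply List.map_congr_left
    intro p hp
    have hp1 : p.1 ∈ u.take σ.length := by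
      obtain ⟨a, b⟩ := p
      exact (List.of_mem_zip hp).1
    have hne : p.1 ≠ u[σ.length] := fun h => hn1 (h ▸ hp1)
    simp [hne]
  have e2 : ((u.drop (σ.length + 1)).map (fun c => ((c, -1) : Char × Int))).map
      (fun p => if (p.1 == u[σ.length]) = true then (u[σ.length], d) else p)
      = (u.drop (σ.length + 1)).map (fun c => ((c, -1) : Char × Int)) := by
    rw [List.map_map]
    apply List.map_congr_left
    intro c hc
    have hne : c ≠ u[σ.length] := fun h => hn2 (h ▸ hc)
    simp [Function.comp, hne]
  apply PySem.Dict.ext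
  rw [PySem.Dict.items_insert_of_contains _ _ hcont]
  simp only [pvMkD]
  rw [hdrop, List.map_append, e1]
  simp only [List.map_cons, beq_self_eq_true, if_true]
  rw [e2]
  rw [show (σ ++ [d]).length = σ.length + 1 by simp, etake, List.zip_append htk]
  simp

theorem pvChildEnv (u : List Char) (σ : List Int) (d : Int) (hnd : u.Nodup)
    (hk : σ.length < u.length) :
    (pvMkEnv u σ).insert u[σ.length] d = pvMkEnv u (σ ++ [d]) := by
  have hσu : σ.length ≤ u.length := le_of_lt hk
  have htk : (u.take σ.length).length = σ.length := by simp [List.length_take, hσu]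
  have hdrop := List.drop_eq_getElem_cons hk
  have hmid : (u.take σ.length ++ u[σ.length] :: u.drop (σ.length + 1)).Nodup := by
    rw [← hdrop, List.take_append_drop]; exact hnd
  have hnotin := (List.nodup_cons.mp (List.nodup_middle.mp hmid)).1
  have hn1 : u[σ.length] ∉ u.take σ.length := fun h => hnotin (List.mem_append_left _ h)
  have hkeys : (pvMkEnv u σ).keys = u.take σ.length := by
    simp only [pvMkEnv, PySem.Dict.keys_mk]
    exact List.map_fst_zip (le_of_eq htk)
  have hcont : (pvMkEnv u σ).contains u[σ.length] = false := by
    rw [Bool.eq_false_iff]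
    intro hc
    have hmem := (PySem.Dict.contains_iff_mem_keys _ _).mp hc
    rw [hkeys] at hmem
    exact hn1 hmem
  have etake : u.take (σ.length + 1) = u.take σ.length ++ [u[σ.length]] := by
    rw [List.take_succ]
    simp [List.getElem?_eq_getElem hk]
  apply PySem.Dict.ext
  rw [PySem.Dict.items_insert_of_not_contains _ _ hcont]
  simp only [pvMkEnv]
  rw [show (σ ++ [d]).length = σ.length + 1 by simp, etake, List.zip_append htk]
  simp

theorem pvUsedGet (σ : List Int) (i : Int) (h0 : 0 ≤ i) (h9 : i ≤ 9) :
    PySem.List.pyGetD (pvMkUsed σ) i false = decide (i ∈ σ) := by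
  rw [PySem.List.pyGetD_of_nonneg _ _ h0]
  have hi : i.toNat < 10 := by omega
  have hlen : i.toNat < (pvMkUsed σ).length := by
    simp [pvMkUsed, PySem.List.length_pyRange_one]; omega
  unfold pvMkUsed at hlen ⊢
  rw [List.getD_eq_getElem _ _ hlen, List.getElem_map, PySem.List.getElem_pyRange_one]
  have hc : (0 + (i.toNat : Int)) = i := by omega
  rw [hc]

theorem pvUsedSet (σ : List Int) (d : Int) (h0 : 0 ≤ d) (h9 : d ≤ 9) :
    PySem.List.pySetD (pvMkUsed σ) d true = pvMkUsed (σ ++ [d]) := by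
  rw [PySem.List.pySetD_of_nonneg _ _ h0]
  have hd10 : d.toNat < 10 := by omega
  have hlen : ∀ (τ' : List Int), (pvMkUsed τ').length = 10 := by
    intro τ'
    simp [pvMkUsed, PySem.List.length_pyRange_one]
  have hmap : ∀ (τ' : List Int) (j : Nat) (hj : j < 10),
      (pvMkUsed τ')[j]'(by rw [hlen]; exact hj) = decide ((j : Int) ∈ τ') := by
    intro τ' j hj
    have hj' : j < (PySem.List.pyRange 0 10 1).length := by
      simp [PySem.List.length_pyRange_one]; omega
    simp only [pvMkUsed]
    rw [List.getElem_map, PySem.List.getElem_pyRange_one]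
    have hc : (0 + (j : Int)) = (j : Int) := by omega
    rw [hc]
  apply List.ext_getElem
  · simp [List.length_set, hlen]
  · intro j h1 h2
    have hj : j < 10 := by rw [hlen] at h2; exact h2
    rw [List.getElem_set, hmap (σ ++ [d]) j hj]
    by_cases hjd : d.toNat = j
    · subst hjd
      have hcast : ((d.toNat : Nat) : Int) = d := Int.toNat_of_nonneg h0
      simp [List.mem_append, hcast]
    · have hne : (j : Int) ≠ d := by omega
      rw [if_neg hjd, hmap σ j hj]
      simp [List.mem_append, hne]

theorem pvUnionSnoc (σ : List Int) (d : Int) (hd : d ∉ σ) :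
    PySem.Set.union σ [d] = σ ++ [d] := by
  rw [show PySem.Set.union σ [d] = PySem.Set.update σ [d] from rfl,
    PySem.Set.update_cons, PySem.Set.update_nil, PySem.Set.add_of_not_mem hd]

-- the leaf: A's string-build-and-parse evaluation equals B's arithmetic evaluation

theorem pvWordEq (env : PySem.Dict Char Int) (w : List Char)
    (h : ∀ c ∈ w, ∃ v, env.get? c = some v ∧ 0 ≤ v ∧ v ≤ 9) :
    pvParseInt (pvNumstrA env w) = pvValueB env w := by
  suffices H : ∀ (w' : List Char), (∀ c ∈ w', ∃ v, env.get? c = some v ∧ 0 ≤ v ∧ v ≤ 9) →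
      ∀ (s : List Char) (a : Int), pvParseInt s = a →
      pvParseInt (w'.foldl (fun num c =>
          num ++ (match env.get? c with
                  | some v => PySem.Int.toChars v
                  | none => [])) s)
        = w'.foldl (fun v c => 10 * v + env.getD c 0) a by
    exact H w h [] 0 rfl
  intro w' hw'
  induction w' with
  | nil => intro s a hs; simpa using hs
  | cons c t ih =>
    intro s a hs
    obtain ⟨v, hv, h0, h9⟩ := hw' c (List.mem_cons_self ..)
    simp only [List.foldl_cons, hv]
    have hgd : env.getD c 0 = v := by
      rw [PySem.Dict.getD_eq_get?_getD, hv]; rfl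
    rw [hgd]
    refine ih (fun c hc => hw' c (List.mem_cons_of_mem _ hc)) _ _ ?_
    show pvParseInt (s ++ PySem.Int.toChars v) = 10 * a + v
    unfold pvParseInt at hs ⊢
    rw [List.foldl_append, hs]
    exact pvDigitFold v a h0 h9

theorem pvLeafEq (words : List (List Char)) (u : List Char) (τ : List Int)
    (hnd : u.Nodup) (hW : ∀ w ∈ words, ∀ c ∈ w, c ∈ u)
    (hlen : τ.length = u.length) (hτ : ∀ v ∈ τ, 0 ≤ v ∧ v ≤ 9) :
    pvIntlistA (pvMkD u τ) words = words.map (fun w => pvValueB (pvMkEnv u τ) w) := by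
  unfold pvIntlistA
  rw [PySem.List.foldl_append_singleton_eq_map]
  rw [List.nil_append]
  apply List.map_congr_left
  intro w hw
  rw [pvMkD_full u τ hlen]
  apply pvWordEq
  intro c hc
  have hcu : c ∈ u := hW w hw c hc
  have hkeys : (pvMkEnv u τ).keys = u := by
    simp only [pvMkEnv, PySem.Dict.keys_mk]
    rw [hlen, List.take_length]
    exact List.map_fst_zip (le_of_eq (by omega))
  have hcont : (pvMkEnv u τ).contains c = true :=
    (PySem.Dict.contains_iff_mem_keys _ _).mpr (by rw [hkeys]; exact hcu)
  rw [PySem.Dict.contains_eq_isSome_get?] at hcont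
  obtain ⟨v, hv⟩ := Option.isSome_iff_exists.mp hcont
  refine ⟨v, hv, ?_⟩
  have hmem := PySem.Dict.mem_items_of_get?_eq_some _ hv
  simp only [pvMkEnv] at hmem
  have : v ∈ τ := (List.of_mem_zip hmem).2
  exact hτ v this

-- the simulation: A's stack machine computes the first success of B's recursive search

theorem pvFindSomeCongr {α β : Type} (l : List α) (f g : α → Option β)
    (h : ∀ a ∈ l, f a = g a) : l.findSome? f = l.findSome? g := by
  induction l with
  | nil => rfl
  | cons a t ih =>
    rw [List.findSome?_cons, List.findSome?_cons, h a (List.mem_cons_self ..)]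
    cases g a with
    | some r => rfl
    | none => exact ih (fun a ha => h a (List.mem_cons_of_mem _ ha))

theorem pvSim (pz : List Char) (words : List (List Char)) (valid u : List Char)
    (hnd : u.Nodup) (hW : ∀ w ∈ words, ∀ c ∈ w, c ∈ u) :
    ∀ (fuel : Nat) (σs : List (List Int)),
      (∀ σ ∈ σs, σ.length ≤ u.length ∧ ∀ v ∈ σ, 0 ≤ v ∧ v ≤ 9) →
      (σs.map (fun σ => 11 ^ (u.length - σ.length))).sum < fuel →
      pvLoopA pz words u valid fuel (σs.map (pvAState u))
        = (σs.findSome? (pvBRes words valid u)).map (pvFinish pz) := by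
  intro fuel
  induction fuel with
  | zero => intro σs _ hf; exact absurd hf (Nat.not_lt_zero _)
  | succ f ih =>
    intro σs hσs hf
    match σs with
    | [] => rfl
    | σ :: σs' =>
      obtain ⟨hlen, hdig⟩ := hσs σ (List.mem_cons_self ..)
      have hσs' := fun σ' h => hσs σ' (List.mem_cons_of_mem _ h)
      rw [List.map_cons]
      by_cases hL : σ.length = u.length
      · -- leaf node
        simp only [pvAState, pvLoopA, if_pos hL]
        rw [pvLeafEq words u σ hnd hW hL hdig]
        rw [List.findSome?_cons]
        have hdropnil : u.drop σ.length = [] := List.drop_eq_nil_of_le (le_of_eq hL.symm)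
        have hB : pvBRes words valid u σ
            = if (PySem.List.slice (words.map (fun w => pvValueB (pvMkEnv u σ) w)) none
                  (some (-1))).sum
                = PySem.List.pyGetD (words.map (fun w => pvValueB (pvMkEnv u σ) w)) (-1) 0
              then some (pvMkEnv u σ) else none := by
          unfold pvBRes
          rw [hdropnil]
          simp only [pvSolveB]
        by_cases hchk : (PySem.List.slice (words.map (fun w => pvValueB (pvMkEnv u σ) w)) none
              (some (-1))).sum
            = PySem.List.pyGetD (words.map (fun w => pvValueB (pvMkEnv u σ) w)) (-1) 0
        · rw [if_pos hchk, hB, if_pos hchk]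
          simp only [Option.map_some]
          rw [pvMkD_full u σ hL]
          rfl
        · rw [if_neg hchk, hB, if_neg hchk]
          have hsum : ((σs'.map fun σ => 11 ^ (u.length - σ.length)).sum) < f := by
            rw [List.map_cons, List.sum_cons, hL, Nat.sub_self, pow_zero] at hf
            omega
          exact ih σs' hσs' hsum
      · -- internal node
        have hklt : σ.length < u.length := lt_of_le_of_ne hlen hL
        simp only [pvAState, pvLoopA, if_neg hL]
        simp only [PySem.List.pyGetD_natCast]
        rw [List.getD_eq_getElem _ _ hklt]
        rw [pvFoldlStackpush pvDigitsA (fun i => i = 0 ∧ u[σ.length] ∈ valid)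
          (fun i => PySem.List.pyGetD (pvMkUsed σ) i false = false)
          (fun i => ((pvMkD u σ).insert u[σ.length] i,
            PySem.List.pySetD (pvMkUsed σ) i true, σ.length + 1))
          (σs'.map (pvAState u))]
        rw [pvDigitsA_reverse]
        set P : Int → Bool := fun i =>
          decide (¬(i = 0 ∧ u[σ.length] ∈ valid) ∧
            PySem.List.pyGetD (pvMkUsed σ) i false = false) with hP
        have hmem_filter : ∀ d ∈ pvDigitsB.filter P,
            (0 ≤ d ∧ d ≤ 9) ∧ d ∉ σ ∧ ¬(d = 0 ∧ u[σ.length] ∈ valid) := by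
          intro d hd
          have hdB := (List.mem_filter.mp hd).1
          have hPd := (List.mem_filter.mp hd).2
          have hbounds := pvDigitsB_bounds d hdB
          rw [hP] at hPd
          have hPd' := of_decide_eq_true hPd
          refine ⟨hbounds, ?_, hPd'.1⟩
          have := hPd'.2
          rw [pvUsedGet σ d hbounds.1 hbounds.2] at this
          simpa using this
        have hmapg : (pvDigitsB.filter P).map (fun i => ((pvMkD u σ).insert u[σ.length] i,
              PySem.List.pySetD (pvMkUsed σ) i true, σ.length + 1))
            = ((pvDigitsB.filter P).map (fun d => σ ++ [d])).map (pvAState u) := by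
          rw [List.map_map]
          apply List.map_congr_left
          intro d hd
          obtain ⟨hbounds, hnot, _⟩ := hmem_filter d hd
          show _ = pvAState u (σ ++ [d])
          unfold pvAState
          rw [pvChildD u σ d hnd hklt, pvUsedSet σ d hbounds.1 hbounds.2]
          simp
        rw [hmapg, ← List.map_append]
        have hBunfold : pvBRes words valid u σ
            = ((pvDigitsB.filter P).map (fun d => σ ++ [d])).findSome?
                (pvBRes words valid u) := by
          unfold pvBRes
          rw [List.drop_eq_getElem_cons hklt]
          simp only [pvSolveB]
          rw [pvFoldlOrelse _ _
            (fun d => if PySem.Set.contains σ d = true ∨ (d = 0 ∧ u[σ.length] ∈ valid)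
              then none
              else pvSolveB words valid (u.drop (σ.length + 1)) (PySem.Set.union σ [d])
                ((pvMkEnv u σ).insert u[σ.length] d))
            (fun r d => rfl) (fun d => rfl)]
          rw [pvFindSomeIfNone pvDigitsB
            (fun d => PySem.Set.contains σ d = true ∨ (d = 0 ∧ u[σ.length] ∈ valid))]
          have hfiltereq : pvDigitsB.filter
              (fun d => decide (¬(PySem.Set.contains σ d = true ∨ (d = 0 ∧ u[σ.length] ∈ valid))))
              = pvDigitsB.filter P := by
            apply List.filter_congr
            intro d hdB
            have hbounds := pvDigitsB_bounds d hdB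
            rw [hP]
            apply decide_eq_decide.mpr
            rw [pvUsedGet σ d hbounds.1 hbounds.2]
            constructor
            · intro hcdk
              constructor
              · intro h0; exact hcdk (Or.inr h0)
              · simp only [decide_eq_false_iff_not]
                intro hm
                exact hcdk (Or.inl ((PySem.Set.contains_iff _ _).mpr hm))
            · rintro ⟨hnz, hnm⟩ (hc | h0)
              · simp only [decide_eq_false_iff_not] at hnm
                exact hnm ((PySem.Set.contains_iff _ _).mp hc)
              · exact hnz h0
          rw [hfiltereq, List.findSome?_map]
          apply pvFindSomeCongr
          intro d hd
          obtain ⟨hbounds, hnotmem, _⟩ := hmem_filter d hd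
          show pvSolveB _ _ _ _ _ = pvBRes words valid u (σ ++ [d])
          unfold pvBRes
          rw [pvUnionSnoc σ d hnotmem, pvChildEnv u σ d hnd hklt,
            show (σ ++ [d]).length = σ.length + 1 by simp]
        have hsum : ((((pvDigitsB.filter P).map (fun d => σ ++ [d]) ++ σs').map
            (fun σ => 11 ^ (u.length - σ.length))).sum) < f := by
          rw [List.map_append, List.sum_append, List.map_map]
          have hconst : ((pvDigitsB.filter P).map
              ((fun σ => 11 ^ (u.length - σ.length)) ∘ (fun d => σ ++ [d])))
              = (pvDigitsB.filter P).map (fun _ => 11 ^ (u.length - (σ.length + 1))) := by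
            apply List.map_congr_left
            intro d _
            simp
          rw [hconst]
          have hsc : ((pvDigitsB.filter P).map
              (fun _ => 11 ^ (u.length - (σ.length + 1)))).sum
              = (pvDigitsB.filter P).length * 11 ^ (u.length - (σ.length + 1)) := by
            rw [List.map_const', List.sum_replicate, smul_eq_mul]
          rw [hsc]
          have hlen10 : (pvDigitsB.filter P).length ≤ 10 :=
            le_trans (List.length_filter_le _ _) (by rw [show pvDigitsB.length = 10 from rfl])
          have hm1 : u.length - σ.length = (u.length - (σ.length + 1)) + 1 := by omega
          rw [List.map_cons, List.sum_cons, hm1, pow_succ] at hf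
          have hpos : 0 < 11 ^ (u.length - (σ.length + 1)) := Nat.pow_pos (by norm_num)
          have hmul : (pvDigitsB.filter P).length * 11 ^ (u.length - (σ.length + 1))
              ≤ 10 * 11 ^ (u.length - (σ.length + 1)) :=
            Nat.mul_le_mul_right _ hlen10
          omega
        have hcond : ∀ σ' ∈ (pvDigitsB.filter P).map (fun d => σ ++ [d]) ++ σs',
            σ'.length ≤ u.length ∧ ∀ v ∈ σ', 0 ≤ v ∧ v ≤ 9 := by
          intro σ' hσ'
          rcases List.mem_append.mp hσ' with hl | hr
          · obtain ⟨d, hd, rfl⟩ := List.mem_map.mp hl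
            obtain ⟨hbounds, _, _⟩ := hmem_filter d hd
            constructor
            · simp only [List.length_append, List.length_cons, List.length_nil]
              omega
            · intro v hv
              rcases List.mem_append.mp hv with h1 | h2
              · exact hdig v h1
              · rw [List.mem_singleton.mp h2]; exact hbounds
          · exact hσs' σ' hr
        rw [ih _ hcond hsum]
        rw [List.findSome?_append, List.findSome?_cons, hBunfold]
        cases ((pvDigitsB.filter P).map (fun d => σ ++ [d])).findSome?
            (pvBRes words valid u) with
        | some r => rfl
        | none => simp [Option.or]

-- B's successful result assigns exactly the letters of `unique`, in order

theorem pvSolveBKeys (words : List (List Char)) (first : List Char) :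
    ∀ (pending : List Char) (used : PySem.Set Int) (env : PySem.Dict Char Int)
      (r : PySem.Dict Char Int),
      pvSolveB words first pending used env = some r →
      r.keys = PySem.Set.update env.keys pending := by
  intro pending
  induction pending with
  | nil =>
    intro used env r h
    simp only [pvSolveB] at h
    rw [PySem.Set.update_nil]
    split at h
    · exact (Option.some.injEq ..).mp h.symm ▸ rfl
    · exact absurd h (by simp)
  | cons ch pending ih =>
    intro used env r h
    simp only [pvSolveB] at h
    rw [pvFoldlOrelse _ _
      (fun d => if PySem.Set.contains used d = true ∨ (d = 0 ∧ ch ∈ first) then none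
        else pvSolveB words first pending (PySem.Set.union used [d]) (env.insert ch d))
      (fun r d => rfl) (fun d => rfl)] at h
    obtain ⟨d, hd, hfd⟩ := List.exists_of_findSome?_eq_some h
    split at hfd
    · exact absurd hfd (by simp)
    · have hk := ih _ _ _ hfd
      rw [PySem.Set.update_cons]
      rw [hk]
      congr 1
      by_cases hc : env.contains ch = true
      · rw [PySem.Dict.keys_insert_of_contains _ _ hc,
          PySem.Set.add_of_mem ((PySem.Dict.contains_iff_mem_keys _ _).mp hc)]
      · have hc' : env.contains ch = false := by
          rw [Bool.eq_false_iff]; exact hc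
        rw [PySem.Dict.keys_insert_of_not_contains _ _ hc',
          PySem.Set.add_of_not_mem (fun hm => hc ((PySem.Dict.contains_iff_mem_keys _ _).mpr hm))]

-- the tokenisation glue: A's paired dict/unique loop against B's unique loop

theorem pvInitFold (cs : List Char) :
    ∀ (s : List Char),
      cs.foldl (fun (st : PySem.Dict Char Int × List Char) c =>
          if st.1.contains c then st else (st.1.insert c (-1), st.2 ++ [c]))
        (PySem.Dict.mk (s.map (fun c => (c, -1))), s)
      = (PySem.Dict.mk ((cs.foldl (fun u c => if c ∈ u then u else u ++ [c]) s).map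
            (fun c => (c, -1))),
         cs.foldl (fun u c => if c ∈ u then u else u ++ [c]) s) := by
  induction cs with
  | nil => intro s; rfl
  | cons c t ih =>
    intro s
    simp only [List.foldl_cons]
    have hcont : (PySem.Dict.mk (s.map (fun c => (c, -1)))).contains c
        = decide (c ∈ s) := by
      rw [PySem.Dict.contains_eq_decide_mem_keys, PySem.Dict.keys_mk]
      simp
    by_cases hc : c ∈ s
    · simp only [hcont, hc, decide_true, if_true, if_pos hc]
      exact ih s
    · simp only [hcont, hc, decide_false, if_false, if_neg hc]
      have hins : (PySem.Dict.mk (s.map (fun c => (c, -1)))).insert c (-1)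
          = PySem.Dict.mk ((s ++ [c]).map (fun c => (c, -1))) := by
        apply PySem.Dict.ext
        rw [PySem.Dict.items_insert_of_not_contains _ _ (by rw [hcont]; simp [hc])]
        simp
      rw [hins]
      exact ih (s ++ [c])


-- ===== VERDICT (by name: the statement is the Claim_ definition above) =====
set_option maxHeartbeats 2000000 in
theorem alphametics_spec : Claim_equal_alphametics := by
  intro puzzle _ _
  show alphametics puzzle = alphametics_alt puzzle
  simp only [alphametics, alphametics_alt]
  set ws := PySem.Chars.splitOn
      (PySem.Chars.replace (PySem.Chars.replace (PySem.Chars.replace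
        (PySem.Chars.strip puzzle.toList) [' '] []) ['='] [',']) ['+'] [',']) [','] with hws
  set valid := ws.map (fun w => PySem.List.pyGetD w 0 ',') with hvalid
  -- the whole equivalence, for any nodup letter list covering the words
  have hmain : ∀ (u : List Char), u.Nodup → (∀ w ∈ ws, ∀ c ∈ w, c ∈ u) →
      (pvLoopA puzzle.toList ws
        ((PySem.Dict.mk (u.map (fun c => (c, -1))), u).2) valid
        (11 ^ ((PySem.Dict.mk (u.map (fun c => (c, -1))), u).2.length + 1))
        [((PySem.Dict.mk (u.map (fun c => (c, -1))), u).1, List.replicate 10 false, 0)]).map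
          String.ofList
      = match pvSolveB ws valid u PySem.Set.empty PySem.Dict.empty with
        | none => none
        | some env => some (String.ofList (u.foldl (fun p ch =>
            PySem.Chars.replace p [ch] (PySem.Int.toChars (env.getD ch 0))) puzzle.toList)) := by
    intro u hnd hW
    show (pvLoopA puzzle.toList ws u valid (11 ^ (u.length + 1))
        [(PySem.Dict.mk (u.map (fun c => (c, -1))), List.replicate 10 false, 0)]).map
          String.ofList = _
    have hstate : (PySem.Dict.mk (u.map (fun c => (c, -1))), List.replicate 10 false, 0)
        = pvAState u [] := by
      unfold pvAState pvMkD pvMkUsed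
      refine congrArg₂ _ ?_ (congrArg₂ _ ?_ rfl)
      · simp
      · decide
    rw [hstate]
    have hsim := pvSim puzzle.toList ws valid u hnd hW (11 ^ (u.length + 1)) [[]]
      (by intro σ hσ; rw [List.mem_singleton.mp hσ]; exact ⟨by simp, by simp⟩)
      (by
        simp only [List.map_cons, List.map_nil, List.sum_cons, List.sum_nil,
          List.length_nil, Nat.sub_zero, Nat.add_zero]
        exact Nat.pow_lt_pow_right (by norm_num) (by omega))
    simp only [List.map_cons, List.map_nil] at hsim
    rw [hsim]
    have hBres : pvBRes ws valid u []
        = pvSolveB ws valid u PySem.Set.empty PySem.Dict.empty := rfl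
    rw [List.findSome?_cons]
    cases hS : pvSolveB ws valid u PySem.Set.empty PySem.Dict.empty with
    | none => rw [hBres, hS]; rfl
    | some env =>
      rw [hBres, hS]
      simp only [Option.map_some]
      have hkeys : env.keys = u := by
        have hup := pvSolveBKeys ws valid u PySem.Set.empty PySem.Dict.empty env hS
        rw [hup, show (PySem.Dict.empty : PySem.Dict Char Int).keys = [] from rfl,
          PySem.Set.update_nil_left]
        exact PySem.Set.ofList_eq_self_of_nodup _ hnd
      have hndk : env.keys.Nodup := by rw [hkeys]; exact hnd
      have hitems := PySem.Dict.items_eq_map_keys env hndk 0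
      rw [hkeys] at hitems
      unfold pvFinish
      rw [hitems, List.foldl_map]
  -- now the two tokenisation loops produce the same letter list
  have hflA : ws.foldl (fun (st : PySem.Dict Char Int × List Char) w =>
      w.foldl (fun st c =>
        if st.1.contains c then st else (st.1.insert c (-1), st.2 ++ [c])) st)
      (PySem.Dict.empty, [])
      = ws.flatten.foldl (fun st c =>
        if st.1.contains c then st else (st.1.insert c (-1), st.2 ++ [c]))
        (PySem.Dict.empty, []) := (List.foldl_flatten).symm
  have hflB : ws.foldl (fun u w =>
      w.foldl (fun u c => if c ∈ u then u else u ++ [c]) u) []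
      = ws.flatten.foldl (fun u c => if c ∈ u then u else u ++ [c]) [] :=
    (List.foldl_flatten).symm
  have hofL : ws.flatten.foldl (fun u c => if c ∈ u then u else u ++ [c]) []
      = PySem.Set.ofList ws.flatten := by
    rw [PySem.Set.ofList_eq_foldl]
    exact PySem.List.foldl_congr_mem _ _ _ _
      (fun acc x _ => (PySem.Set.add_eq_ite acc x).symm)
  have hnd : (ws.flatten.foldl (fun u c => if c ∈ u then u else u ++ [c]) []).Nodup := by
    rw [hofL]; exact PySem.Set.nodup_ofList _
  have hW : ∀ w ∈ ws, ∀ c ∈ w,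
      c ∈ ws.flatten.foldl (fun u c => if c ∈ u then u else u ++ [c]) [] := by
    intro w hw c hc
    rw [hofL]
    exact (PySem.Set.mem_ofList ..).mpr (List.mem_flatten.mpr ⟨w, hw, hc⟩)
  have hinit := pvInitFold (ws.flatten) []
  simp only [List.map_nil] at hinit
  rw [show (PySem.Dict.mk ([] : List (Char × Int))) = PySem.Dict.empty from rfl] at hinit
  rw [hflA, hflB, hinit]
  exact hmain _ hnd hW
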